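-- pv_equiv track=rewrite | github.com/raeez/chiral-bar-cobar | compute/lib/cy_ainfty_ext_engine.py | quartic_k3_line_bundle_cohomology
-- ===== SOURCE A (Python) =====
-- from typing import Dict, List, Optional, Tuple
--
-- def quartic_k3_line_bundle_cohomology(p: int) -> Dict[int, int]:
--     """Compute dim H^q(S, O_S(p)) for the quartic K3 surface S in P^3.
--
--     Uses the short exact sequence 0 -> O_{P^3}(p-4) -> O_{P^3}(p) -> O_S(p) -> 0
--     (the quartic is cut out by a degree 4 polynomial).
--
--     The long exact sequence in cohomology gives:
--         0 -> H^0(P^3, O(p-4)) -> H^0(P^3, O(p)) -> H^0(S, O_S(p))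
--           -> H^1(P^3, O(p-4)) -> ...
--
--     P^3 cohomology (Bott formula):
--         H^0(P^3, O(n)) = binom(n+3, 3) for n >= 0, else 0
--         H^1(P^3, O(n)) = 0  for all n
--         H^2(P^3, O(n)) = 0  for all n
--         H^3(P^3, O(n)) = binom(-n-1, 3) for n <= -4, else 0
--                         = dim H^0(P^3, O(-n-4)) by Serre duality
--
--     Returns {q: dim H^q(S, O_S(p))} for q = 0, 1, 2.
--     """
--     from math import comb
--
--     def h0_p3(n):
--         """dim H^0(P^3, O(n))."""
--         if n < 0:
--             return 0
--         return comb(n + 3, 3)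
--
--     def h3_p3(n):
--         """dim H^3(P^3, O(n)) = dim H^0(P^3, O(-n-4)) by Serre duality."""
--         if n > -4:
--             return 0
--         return comb(-n - 1, 3)
--
--     # Long exact sequence from 0 -> O(p-4) -> O(p) -> O_S(p) -> 0
--     # H^0: 0 -> H^0(O(p-4)) --a--> H^0(O(p)) --b--> H^0(O_S(p)) --delta-->
--     #       H^1(O(p-4)) = 0 -> H^1(O(p)) = 0 -> H^1(O_S(p)) --delta-->
--     #       H^2(O(p-4)) = 0 -> H^2(O(p)) = 0 -> H^2(O_S(p)) --delta-->
--     #       H^3(O(p-4)) --a'--> H^3(O(p)) -> 0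
--
--     # Since H^1(P^3, O(n)) = H^2(P^3, O(n)) = 0 for all n:
--     # h^0(O_S(p)) = h^0(O(p)) - h^0(O(p-4))
--     # h^1(O_S(p)) = 0
--     # h^2(O_S(p)) = h^3(O(p-4)) - h^3(O(p))
--
--     # But we need to be more careful with the connecting homomorphism.
--     # The exact sequence splits into short exact sequences:
--     # 0 -> coker(a) -> H^0(O_S(p)) -> ker(delta_0) -> 0
--     # where a: H^0(O(p-4)) -> H^0(O(p)) is multiplication by the quartic.
--
--     # Since H^1 and H^2 of P^3 vanish for all line bundles:
--     h0_S = h0_p3(p) - h0_p3(p - 4)  # for p >= 0 (and p-4 >= 0)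
--     h1_S = 0
--     h2_S = h3_p3(p - 4) - h3_p3(p)
--
--     # Handle edge cases where the subtraction gives negative (meaning map is not injective/surjective)
--     # Actually for a smooth quartic, the restriction map is surjective on H^0 for p >= 0
--     # and the multiplication map H^0(O(p-4)) -> H^0(O(p)) is injective.
--     # For p < 0: h^0(O_S(p)) = 0.
--     # For p < 4: h^0(O(p-4)) = 0, so h^0(O_S(p)) = h^0(O(p)).
--
--     if p < 0:
--         h0_S = 0
--     else:
--         h0_S = max(0, h0_p3(p) - h0_p3(p - 4))
--
--     h2_S = max(0, h3_p3(p - 4) - h3_p3(p))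
--
--     # Cross-check via Riemann-Roch on K3:
--     # chi(O_S(p)) = h^0 - h^1 + h^2 = (1/2) H.H * p^2 + chi(O_S)
--     # For quartic K3: H^2 = deg(S) = 4, so chi(O_S(p)) = 2p^2 + 2.
--     # Serre duality on K3: H^q(O_S(p)) = H^{2-q}(O_S(-p))^* since omega_S = O_S.
--     rr_chi = 2 * p * p + 2  # = (H^2/2)*p^2 + chi(O_S) = 2p^2 + 2
--
--     # Verify consistency
--     computed_chi = h0_S - h1_S + h2_S
--     # If they disagree, use Serre duality + RR to correct
--     if computed_chi != rr_chi:
--         # Use Serre duality: h^2(O_S(p)) = h^0(O_S(-p))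
--         h2_S_serre = quartic_k3_line_bundle_cohomology(-p)[0] if p != 0 else 1
--         h0_S = rr_chi + h1_S - h2_S_serre
--         h2_S = h2_S_serre
--         if h0_S < 0:
--             h0_S = 0
--             h2_S = h0_S - rr_chi + h1_S  # from chi equation
--             h2_S = -(rr_chi - h1_S)  # This shouldn't happen for valid K3
--             # Fallback: trust RR + Serre duality directly
--             pass
--
--     return {0: h0_S, 1: h1_S, 2: h2_S}
-- ===== SOURCE B (Python) =====
-- def quartic_k3_line_bundle_cohomology(p: int) -> dict:
--     """Closed form via Riemann-Roch on the quartic K3: chi(O_S(p)) = 2p^2 + 2,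
--     all of which sits in H^0 for p > 0, in H^2 for p < 0, and splits 1/1 at p = 0."""
--     chi = 2 * p * p + 2
--     if p > 0:
--         return {0: chi, 1: 0, 2: 0}
--     if p < 0:
--         return {0: 0, 1: 0, 2: chi}
--     return {0: 1, 1: 0, 2: 1}
-- ===== Notes on version B (the rewrite author's own statement) =====
-- stated objective: simpler
-- what changed: B replaces the Bott-formula binomial computations, max-clamps and the Riemann-Roch consistency/correction branch (with its recursive Serre-duality call) by the quadratic Riemann-Roch closed form for chi dispatched on the sign of p.
import Mathlib
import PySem

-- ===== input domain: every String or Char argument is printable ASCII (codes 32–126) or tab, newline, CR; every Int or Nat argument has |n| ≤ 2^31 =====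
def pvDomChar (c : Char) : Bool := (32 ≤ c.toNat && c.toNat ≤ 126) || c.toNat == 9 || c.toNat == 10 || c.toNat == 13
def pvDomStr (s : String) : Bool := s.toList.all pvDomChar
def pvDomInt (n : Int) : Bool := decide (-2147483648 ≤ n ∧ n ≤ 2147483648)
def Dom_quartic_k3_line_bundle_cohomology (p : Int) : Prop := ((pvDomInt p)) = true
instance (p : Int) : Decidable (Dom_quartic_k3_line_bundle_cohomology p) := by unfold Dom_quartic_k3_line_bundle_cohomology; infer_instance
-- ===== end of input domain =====

-- B replaces A's Bott-formula binomials and consistency/correction branch by the quadratic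
-- Riemann-Roch closed form for chi dispatched on the sign of p (objective: simpler).

-- ===== PORT A =====
-- math.comb n k, ported the way CPython computes it: falling factorial n*(n-1)*...*(n-k+1)
-- divided by k! (exact for all n k; proved equal to Nat.choose below)
def pvComb (n k : Nat) : Nat := ((List.range k).foldl (fun a i => a * (n - i)) 1) / k.factorial
-- h0_p3(n) = dim H^0(P^3, O(n))
def pvH0P3 (n : Int) : Int := if n < 0 then 0 else (pvComb (n + 3).toNat 3 : Int)
-- h3_p3(n)
def pvH3P3 (n : Int) : Int := if -4 < n then 0 else (pvComb (-n - 1).toNat 3 : Int)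

-- A's self-recursion (quartic_k3_line_bundle_cohomology(-p) inside the consistency branch) is
-- not structural, so it is ported with fuel; fuel 1 is exact because the consistency branch is
-- provably never taken (the proofs below show computed_chi = rr_chi on every input).
-- The dead first assignments to h0_S/h2_S in A are unconditionally overwritten and are not ported.
-- Python's dict[0] lookup is ported as List.lookup 0 (key 0 is always present, so getD never fires).
def pvQAFuel : Nat → Int → List (Int × Int)
  | 0, _ => []
  | fuel + 1, p =>
    let h0S : Int := if p < 0 then 0 else max 0 (pvH0P3 p - pvH0P3 (p - 4))
    let h1S : Int := 0
    let h2S : Int := max 0 (pvH3P3 (p - 4) - pvH3P3 p)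
    let rr : Int := 2 * p * p + 2
    if h0S - h1S + h2S ≠ rr then
      let h2serre : Int := if p ≠ 0 then ((pvQAFuel fuel (-p)).lookup 0).getD 0 else 1
      let h0' : Int := rr + h1S - h2serre
      if h0' < 0 then [(0, 0), (1, h1S), (2, -(rr - h1S))]
      else [(0, h0'), (1, h1S), (2, h2serre)]
    else [(0, h0S), (1, h1S), (2, h2S)]

def quartic_k3_line_bundle_cohomology (p : Int) : List (Int × Int) := pvQAFuel 1 p

-- ===== PORT B =====
def quartic_k3_line_bundle_cohomology_alt (p : Int) : List (Int × Int) :=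
  let chi : Int := 2 * p * p + 2
  if 0 < p then [(0, chi), (1, 0), (2, 0)]
  else if p < 0 then [(0, 0), (1, 0), (2, chi)]
  else [(0, 1), (1, 0), (2, 1)]

-- ===== PRECONDITION & SPEC =====
def Spec_quartic_k3_line_bundle_cohomology (p : Int) (out : List (Int × Int)) : Prop := out = quartic_k3_line_bundle_cohomology_alt p
instance (p : Int) (out : List (Int × Int)) : Decidable (Spec_quartic_k3_line_bundle_cohomology p out) := by unfold Spec_quartic_k3_line_bundle_cohomology; infer_instance

-- ===== CLAIM (what is proved, stated in full; the proofs are below) =====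
def Claim_equal_quartic_k3_line_bundle_cohomology : Prop := ∀ (p : Int), Dom_quartic_k3_line_bundle_cohomology p → Spec_quartic_k3_line_bundle_cohomology p (quartic_k3_line_bundle_cohomology p)

-- ===== LEMMAS AND PROOFS =====

theorem two_choose_two (k : ℕ) : (((k + 2).choose 2 : ℕ) : ℤ) * 2 = ((k : ℤ) + 1) * ((k : ℤ) + 2) := by
  induction k with
  | zero => decide
  | succ j ihj =>
    have hs : (j + 3).choose 2 = (j + 2).choose 1 + (j + 2).choose 2 := Nat.choose_succ_succ _ _
    have h1 : (j + 2).choose 1 = j + 2 := Nat.choose_one_right _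
    push_cast [show j + 1 + 2 = j + 3 from rfl, hs, h1]
    push_cast at ihj
    nlinarith [ihj]

theorem six_choose_three (n : ℕ) : (((n + 3).choose 3 : ℕ) : ℤ) * 6 = ((n : ℤ) + 1) * ((n : ℤ) + 2) * ((n : ℤ) + 3) := by
  induction n with
  | zero => decide
  | succ k ih =>
    have h2 := two_choose_two (k + 1)
    have hs : (k + 4).choose 3 = (k + 3).choose 2 + (k + 3).choose 3 := Nat.choose_succ_succ _ _
    push_cast [show k + 1 + 2 = k + 3 from rfl] at h2
    push_cast [show k + 1 + 3 = k + 4 from rfl, hs]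
    nlinarith [ih, h2]

theorem pvComb_three (m : ℕ) : pvComb (m + 3) 3 = (m + 3).choose 3 := by
  have hre : List.range 3 = [0, 1, 2] := by decide
  have h1 : pvComb (m + 3) 3 = ((m + 3) * (m + 2) * (m + 1)) / 6 := by
    simp only [pvComb, hre, List.foldl, Nat.factorial]
    norm_num
    rw [show m + 3 - 2 = m + 1 from by omega]
  have h2i : ((m : ℤ) + 3) * ((m : ℤ) + 2) * ((m : ℤ) + 1) = (((m + 3).choose 3 : ℕ) : ℤ) * 6 := by
    linear_combination - six_choose_three m
  have h2 : (m + 3) * (m + 2) * (m + 1) = (m + 3).choose 3 * 6 := by exact_mod_cast h2i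
  rw [h1, h2]
  exact Nat.mul_div_cancel _ (by norm_num)

-- C(m+7,3) - C(m+3,3) = 2(m+4)^2 + 2  (the tail identity used for p >= 4 and p <= -4)
theorem choose_tail (m : ℕ) : (((m + 7).choose 3 : ℕ) : ℤ) - (((m + 3).choose 3 : ℕ) : ℤ) = 2 * ((m : ℤ) + 4) * ((m : ℤ) + 4) + 2 := by
  have h1 := six_choose_three (m + 4)
  have h2 := six_choose_three m
  push_cast [show m + 4 + 3 = m + 7 from rfl] at h1
  have h6 : (6 : ℤ) * ((((m + 7).choose 3 : ℕ) : ℤ) - (((m + 3).choose 3 : ℕ) : ℤ)) = 6 * (2 * ((m : ℤ) + 4) * ((m : ℤ) + 4) + 2) := by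
    linear_combination h1 - h2
  have := mul_left_cancel₀ (by norm_num : (6 : ℤ) ≠ 0) h6
  linarith

theorem ports_eq (p : Int) : pvQAFuel 1 p = quartic_k3_line_bundle_cohomology_alt p := by
  rcases lt_trichotomy p 0 with hp | rfl | hp
  · by_cases h4 : p ≤ -4
    · obtain ⟨m, rfl⟩ : ∃ m : ℕ, p = -((m : ℤ) + 4) := ⟨(-p - 4).toNat, by omega⟩
      have e1 : (-(-((m : ℤ) + 4) - 4) - 1).toNat = m + 7 := by omega
      have e2 : (-(-((m : ℤ) + 4)) - 1).toNat = m + 3 := by omega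
      have c0 : (-((m : ℤ) + 4) < 0) := by omega
      have c1 : ¬ (-4 : ℤ) < -((m : ℤ) + 4) - 4 := by omega
      have c2 : ¬ (-4 : ℤ) < -((m : ℤ) + 4) := by omega
      have b1 : pvComb (m + 7) 3 = (m + 7).choose 3 := by simpa using pvComb_three (m + 4)
      have b2 : pvComb (m + 3) 3 = (m + 3).choose 3 := pvComb_three m
      have key := choose_tail m
      simp only [pvQAFuel, pvH0P3, pvH3P3, quartic_k3_line_bundle_cohomology_alt,
        if_pos c0, if_neg c1, if_neg c2, e1, e2, b1, b2, key]
      have hnn : (0 : ℤ) ≤ 2 * ((m : ℤ) + 4) * ((m : ℤ) + 4) + 2 := by positivity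
      rw [max_eq_right hnn]
      have : ¬ (0 : ℤ) < -((m : ℤ) + 4) := by omega
      simp only [if_neg this]
      have hrr : (0 : ℤ) - 0 + (2 * ((m : ℤ) + 4) * ((m : ℤ) + 4) + 2) = 2 * -((m : ℤ) + 4) * -((m : ℤ) + 4) + 2 := by ring
      simp only [ne_eq, hrr, not_true_eq_false, if_false]
      have : 2 * ((m : ℤ) + 4) * ((m : ℤ) + 4) + 2 = 2 * -((m : ℤ) + 4) * -((m : ℤ) + 4) + 2 := by ring
      rw [this]
    · interval_cases p <;> decide
  · decide
  · by_cases h4 : 4 ≤ p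
    · obtain ⟨m, rfl⟩ : ∃ m : ℕ, p = (m : ℤ) + 4 := ⟨(p - 4).toNat, by omega⟩
      have e1 : (((m : ℤ) + 4) + 3).toNat = m + 7 := by omega
      have e2 : (((m : ℤ) + 4) - 4 + 3).toNat = m + 3 := by omega
      have c0 : ¬ ((m : ℤ) + 4 < 0) := by omega
      have c1 : ¬ ((m : ℤ) + 4 - 4 < 0) := by omega
      have c2 : (-4 : ℤ) < (m : ℤ) + 4 - 4 := by omega
      have c3 : (-4 : ℤ) < (m : ℤ) + 4 := by omega
      have b1 : pvComb (m + 7) 3 = (m + 7).choose 3 := by simpa using pvComb_three (m + 4)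
      have b2 : pvComb (m + 3) 3 = (m + 3).choose 3 := pvComb_three m
      have key := choose_tail m
      simp only [pvQAFuel, pvH0P3, pvH3P3, quartic_k3_line_bundle_cohomology_alt,
        if_neg c0, if_neg c1, if_pos c2, if_pos c3, e1, e2, b1, b2, key]
      have hnn : (0 : ℤ) ≤ 2 * ((m : ℤ) + 4) * ((m : ℤ) + 4) + 2 := by positivity
      rw [max_eq_right hnn]
      have hpos : (0 : ℤ) < (m : ℤ) + 4 := by omega
      simp only [if_pos hpos]
      norm_num
    · interval_cases p <;> decide

-- ===== VERDICT (by name: the statement is the Claim_ definition above) =====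
theorem quartic_k3_line_bundle_cohomology_spec : Claim_equal_quartic_k3_line_bundle_cohomology := by
  intro p _
  unfold Spec_quartic_k3_line_bundle_cohomology quartic_k3_line_bundle_cohomology
  exact ports_eq p
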